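-- pv_equiv track=rewrite | github.com/sitingGZ/bert-sner-cardio | app/dashpages/utils.py | make_orginal_text_spans
-- ===== SOURCE A (Python) =====
-- def make_orginal_text_spans(sents):
--     """
--     [['519-1', '24327-24332', 'Ärztl', '_', '_', '_', 'Abschluss'],
--       ['519-2', '24332-24333', '.', '_', '_', '_', 'Abschluss'],
--       ['519-3', '24334-24342', 'Direktor', '_', '_', '_', 'Abschluss'],
--       ['519-4', '24343-24351', 'Oberarzt', '_', '_', '_', 'Abschluss'],
--       ['519-5', '24352-24364', 'Stationsarzt', '_', '_', '_', 'Abschluss']]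
--     """
--     text_str = ''
--     spans = [None] * len(sents)
--     start = 0
--
--     for i, s in enumerate(sents):
--         if i == 0:
--             text_str += s[2]
--
--             end = len(s[2])
--             spans[i] = (start, end)
--         else:
--             previous_end = sents[i-1][1].split('-')[1]
--             current_start = s[1].split('-')[0]
--             text_str += ' ' * (int(current_start) - int(previous_end))
--             start = len(text_str)
--             text_str += s[2]
--             end = start + len(s[2])
--             spans[i] = (start, end)
--
--     return text_str, spans
-- ===== SOURCE B (Python) =====
-- def make_orginal_text_spans(sents):
--     # Pass 1: build the span table with a running position accumulator.
--     spans = []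
--     if sents:
--         pos = len(sents[0][2])
--         spans.append((0, pos))
--         for prev, cur in zip(sents, sents[1:]):
--             gap = int(cur[1].split('-')[0]) - int(prev[1].split('-')[1])
--             start = pos + max(0, gap)
--             pos = start + len(cur[2])
--             spans.append((start, pos))
--     # Pass 2: rebuild the text from the spans alone.
--     parts = []
--     filled = 0
--     for (start, _), s in zip(spans, sents):
--         parts.append(' ' * (start - filled))
--         parts.append(s[2])
--         filled = start + len(s[2])
--     return ''.join(parts), spans
-- ===== Notes on version B (the rewrite author's own statement) =====
-- stated objective: alternative
-- what changed: A interleaves everything in one enumerate loop that indexes back into the whole list and grows the string mid-step; B first builds the span table alone by folding over adjacent (prev, cur) pairs with a running position accumulator, then rebuilds the text in a second pass from the spans alone (padding each token to its recorded start).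
import Mathlib
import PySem

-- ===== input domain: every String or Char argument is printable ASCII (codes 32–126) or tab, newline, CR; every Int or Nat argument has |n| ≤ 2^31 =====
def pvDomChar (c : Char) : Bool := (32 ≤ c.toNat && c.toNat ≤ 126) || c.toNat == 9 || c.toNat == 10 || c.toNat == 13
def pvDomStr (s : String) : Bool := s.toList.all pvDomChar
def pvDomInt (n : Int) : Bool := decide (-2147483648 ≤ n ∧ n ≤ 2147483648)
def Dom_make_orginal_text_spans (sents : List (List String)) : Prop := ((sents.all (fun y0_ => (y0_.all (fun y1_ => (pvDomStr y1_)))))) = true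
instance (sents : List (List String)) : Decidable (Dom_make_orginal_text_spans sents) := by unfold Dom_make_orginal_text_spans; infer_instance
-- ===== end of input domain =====

-- B replaces A's single enumerate loop (index arithmetic into the whole list, string grown in step) by two
-- differently-shaped passes: pass 1 builds the span table alone from adjacent pairs with a running position
-- accumulator, pass 2 rebuilds the text from the spans alone; objective: alternative decomposition, not speed.

-- ===== PORT A =====
-- loop body of A's 'for i, s in enumerate(sents)'; text_str carried as List Char (String is opaque to the kernel)
def pvStepA (sents : List (List String)) (st : List Char × List (Int × Int) × Int)
    (p : Int × List String) : List Char × List (Int × Int) × Int :=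
  let text_str := st.1; let spans := st.2.1; let start := st.2.2
  let i := p.1; let s := p.2
  if i == 0 then
    let text_str := text_str ++ (PySem.List.pyGetD s 2 "").toList
    let e : Int := ((PySem.List.pyGetD s 2 "").toList.length : Int)
    (text_str, spans ++ [(start, e)], start)   -- spans[i] assigned once, in index order: ported as append (exact)
  else
    let previous_end := PySem.List.pyGetD ((PySem.Str.split? (PySem.List.pyGetD (PySem.List.pyGetD sents (i-1) []) 1 "") "-").getD []) 1 ""
    let current_start := PySem.List.pyGetD ((PySem.Str.split? (PySem.List.pyGetD s 1 "") "-").getD []) 0 ""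
    -- ' ' * n is empty for n ≤ 0: Int.toNat clamps, exact; .getD 0 sits where Python raises (excluded by Pre_)
    let text_str := text_str ++ List.replicate ((PySem.Int.ofStr? current_start).getD 0 - (PySem.Int.ofStr? previous_end).getD 0).toNat ' '
    let start := (text_str.length : Int)
    let text_str := text_str ++ (PySem.List.pyGetD s 2 "").toList
    let e := start + ((PySem.List.pyGetD s 2 "").toList.length : Int)
    (text_str, spans ++ [(start, e)], start)

def make_orginal_text_spans (sents : List (List String)) : String × (List (Int × Int)) :=
  let r := (PySem.List.enumerate sents 0).foldl (pvStepA sents) ([], [], 0)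
  (String.ofList r.1, r.2.1)

-- ===== PORT B =====
-- pass 1 body: fold over adjacent pairs (prev, cur), state = (spans, running position)
def pvStepB (st : List (Int × Int) × Int) (pc : List String × List String) : List (Int × Int) × Int :=
  let spans := st.1; let pos := st.2
  let prev := pc.1; let cur := pc.2
  let gap := (PySem.Int.ofStr? (PySem.List.pyGetD ((PySem.Str.split? (PySem.List.pyGetD cur 1 "") "-").getD []) 0 "")).getD 0
           - (PySem.Int.ofStr? (PySem.List.pyGetD ((PySem.Str.split? (PySem.List.pyGetD prev 1 "") "-").getD []) 1 "")).getD 0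
  let start := pos + max 0 gap
  let pos := start + ((PySem.List.pyGetD cur 2 "").toList.length : Int)
  (spans ++ [(start, pos)], pos)

-- pass 2 body: rebuild the text from a span and its token, state = (parts, chars filled so far)
def pvBuildB (st : List (List Char) × Int) (p : (Int × Int) × List String) : List (List Char) × Int :=
  let parts := st.1; let filled := st.2
  let start := p.1.1; let s := p.2
  (parts ++ [List.replicate (start - filled).toNat ' ', (PySem.List.pyGetD s 2 "").toList],
   start + ((PySem.List.pyGetD s 2 "").toList.length : Int))

def make_orginal_text_spans_alt (sents : List (List String)) : String × (List (Int × Int)) :=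
  let spans : List (Int × Int) :=
    match sents with
    | [] => []
    | s0 :: rest =>
      let pos0 : Int := ((PySem.List.pyGetD s0 2 "").toList.length : Int)
      ((sents.zip rest).foldl pvStepB ([(0, pos0)], pos0)).1
  let parts := ((spans.zip sents).foldl pvBuildB ([], 0)).1
  (String.ofList parts.flatten, spans)

-- ===== PRECONDITION & SPEC =====
-- pair check for consecutive tokens: prev[1].split('-') has a second piece and both offset fields parse as int
def pvPairOk (prev cur : List String) : Bool :=
  decide (1 < ((PySem.Str.split? (PySem.List.pyGetD prev 1 "") "-").getD []).length)
  && (PySem.Int.ofStr? (PySem.List.pyGetD ((PySem.Str.split? (PySem.List.pyGetD prev 1 "") "-").getD []) 1 "")).isSome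
  && (PySem.Int.ofStr? (PySem.List.pyGetD ((PySem.Str.split? (PySem.List.pyGetD cur 1 "") "-").getD []) 0 "")).isSome

-- exactly the inputs where the Python A returns: every token has a third field, and for every adjacent pair
-- the '-'-separated offsets A reads exist and parse as int (otherwise A raises IndexError/ValueError)
def Pre_make_orginal_text_spans (sents : List (List String)) : Prop :=
  ((sents.all fun s => decide (2 < s.length))
    && (sents.zip sents.tail).all fun pc => pvPairOk pc.1 pc.2) = true
instance (sents : List (List String)) : Decidable (Pre_make_orginal_text_spans sents) := by
  unfold Pre_make_orginal_text_spans; infer_instance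

def pvWitness_make_orginal_text_spans : List (List String) := []

def Spec_make_orginal_text_spans (sents : List (List String)) (out : String × (List (Int × Int))) : Prop := out = make_orginal_text_spans_alt sents
instance (sents : List (List String)) (out : String × (List (Int × Int))) : Decidable (Spec_make_orginal_text_spans sents out) := by unfold Spec_make_orginal_text_spans; infer_instance

-- ===== CLAIM (what is proved, stated in full; the proofs are below) =====
def Claim_equal_make_orginal_text_spans : Prop := ∀ (sents : List (List String)), Dom_make_orginal_text_spans sents → Pre_make_orginal_text_spans sents → Spec_make_orginal_text_spans sents (make_orginal_text_spans sents)

-- ===== LEMMAS AND PROOFS =====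

-- reference values both loop bodies compute
def pvTok (s : List String) : List Char := (PySem.List.pyGetD s 2 "").toList
def pvGap (prev cur : List String) : Int :=
  (PySem.Int.ofStr? (PySem.List.pyGetD ((PySem.Str.split? (PySem.List.pyGetD cur 1 "") "-").getD []) 0 "")).getD 0
  - (PySem.Int.ofStr? (PySem.List.pyGetD ((PySem.Str.split? (PySem.List.pyGetD prev 1 "") "-").getD []) 1 "")).getD 0

-- reference span table / text / final position for the tokens after the first
def pvSpans (prev : List String) (pos : Int) : List (List String) → List (Int × Int)
  | [] => []
  | c :: l => (pos + max 0 (pvGap prev c), pos + max 0 (pvGap prev c) + (pvTok c).length)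
      :: pvSpans c (pos + max 0 (pvGap prev c) + (pvTok c).length) l

def pvEnd (prev : List String) (pos : Int) : List (List String) → Int
  | [] => pos
  | c :: l => pvEnd c (pos + max 0 (pvGap prev c) + (pvTok c).length) l

def pvText (prev : List String) : List (List String) → List Char
  | [] => []
  | c :: l => List.replicate (pvGap prev c).toNat ' ' ++ pvTok c ++ pvText c l

def pvParts (prev : List String) : List (List String) → List (List Char)
  | [] => []
  | c :: l => List.replicate (pvGap prev c).toNat ' ' :: pvTok c :: pvParts c l

theorem pv_flatten_parts (prev : List String) (l : List (List String)) :
    (pvParts prev l).flatten = pvText prev l := by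
  induction l generalizing prev with
  | nil => rfl
  | cons c l ih => simp [pvParts, pvText, ih]

theorem pv_toNat_max (g : Int) : (max 0 g).toNat = g.toNat := by omega

theorem pvB_spans (l : List (List String)) :
    ∀ (prev : List String) (spans : List (Int × Int)) (pos : Int),
    (((prev :: l).zip l).foldl pvStepB (spans, pos))
      = (spans ++ pvSpans prev pos l, pvEnd prev pos l) := by
  induction l with
  | nil => intro prev spans pos; simp [pvSpans, pvEnd]
  | cons c l ih =>
    intro prev spans pos
    simp only [List.zip_cons_cons, List.foldl_cons, pvStepB, pvSpans, pvEnd]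
    rw [ih]
    simp [pvGap, pvTok, List.append_assoc]

theorem pvB_build (l : List (List String)) :
    ∀ (prev : List String) (parts : List (List Char)) (filled : Int),
    (((pvSpans prev filled l).zip l).foldl pvBuildB (parts, filled))
      = (parts ++ pvParts prev l, pvEnd prev filled l) := by
  induction l with
  | nil => intro prev parts filled; simp [pvSpans, pvParts, pvEnd]
  | cons c l ih =>
    intro prev parts filled
    simp only [pvSpans, List.zip_cons_cons, List.foldl_cons, pvBuildB, pvParts, pvEnd]
    rw [show filled + max 0 (pvGap prev c) - filled = max 0 (pvGap prev c) by ring, pv_toNat_max]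
    simp only [show (PySem.List.pyGetD c 2 "").toList = pvTok c from rfl]
    rw [ih]
    simp [pvTok, List.append_assoc]
theorem pvA_loop (sents : List (List String)) (l : List (List String)) :
    ∀ (k : Nat) (prev : List String) (text : List Char) (spans : List (Int × Int)) (start0 : Int),
    sents.drop k = l → 1 ≤ k → sents[k-1]? = some prev →
    ∃ st, (PySem.List.enumerate l (k : Int)).foldl (pvStepA sents) (text, spans, start0)
      = (text ++ pvText prev l, spans ++ pvSpans prev (text.length : Int) l, st) := by
  induction l with
  | nil => intro k prev text spans start0 _ _ _; exact ⟨start0, by simp [pvText, pvSpans, PySem.List.enumerate]⟩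
  | cons c l ih =>
    intro k prev text spans start0 hdrop hk hprev
    rw [PySem.List.enumerate_cons]
    simp only [List.foldl_cons]
    have hne : ((k : Int) == 0) = false := by simp; omega
    have hidx : (k : Int) - 1 = ((k - 1 : Nat) : Int) := by omega
    have hc : sents[k]? = some c := by rw [← List.head?_drop, hdrop]; rfl
    have hdrop' : sents.drop (k+1) = l := by rw [← List.tail_drop, hdrop]; rfl
    have hprevv : PySem.List.pyGetD sents ((k : Int) - 1) [] = prev := by
      rw [hidx, PySem.List.pyGetD_natCast, List.getD_eq_getElem?_getD, hprev]; rfl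
    simp only [pvStepA, hne, Bool.false_eq_true, if_false, hprevv]
    simp only [← pvGap.eq_1, ← pvTok.eq_1]
    rw [show ((k : Int) + 1) = ((k + 1 : Nat) : Int) by push_cast; ring]
    obtain ⟨st, hst⟩ := ih (k+1) c
      (text ++ List.replicate (pvGap prev c).toNat ' ' ++ pvTok c)
      (spans ++ [(((text ++ List.replicate (pvGap prev c).toNat ' ').length : Int),
        ((text ++ List.replicate (pvGap prev c).toNat ' ').length : Int) + ((pvTok c).length : Int))])
      (((text ++ List.replicate (pvGap prev c).toNat ' ').length : Int))
      hdrop' (by omega) (by simpa using hc)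
    refine ⟨st, ?_⟩
    rw [hst]
    simp only [pvText, pvSpans, Prod.mk.injEq, List.append_assoc, List.length_append,
      List.length_replicate]
    have h1 : ((text.length + (pvGap prev c).toNat : Nat) : Int)
        = (text.length : Int) + max 0 (pvGap prev c) := by omega
    have h2 : ((text.length + ((pvGap prev c).toNat + (pvTok c).length) : Nat) : Int)
        = (text.length : Int) + max 0 (pvGap prev c) + ((pvTok c).length : Int) := by omega
    refine ⟨trivial, ?_, trivial⟩
    rw [h2, List.singleton_append, h1]
theorem main_eq (sents : List (List String)) :
    make_orginal_text_spans sents = make_orginal_text_spans_alt sents := by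
  cases sents with
  | nil => rfl
  | cons s0 rest =>
    unfold make_orginal_text_spans make_orginal_text_spans_alt
    rw [PySem.List.enumerate_cons]
    simp only [List.foldl_cons]
    have h0 : pvStepA (s0::rest) ([], [], 0) (0, s0)
        = (pvTok s0, [(0, ((pvTok s0).length : Int))], 0) := by
      simp [pvStepA, pvTok]
    rw [h0]
    obtain ⟨st, hA⟩ := pvA_loop (s0::rest) rest 1 s0 (pvTok s0)
      [(0, ((pvTok s0).length : Int))] 0 rfl le_rfl rfl
    rw [show ((0:Int)+1) = ((1:Nat):Int) from rfl, hA]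
    -- B side
    rw [pvB_spans]
    simp only [List.singleton_append, List.zip_cons_cons, List.foldl_cons]
    have hb0 : pvBuildB ([], 0) ((0, ((pvTok s0).length : Int)), s0)
        = ([[], pvTok s0], ((pvTok s0).length : Int)) := by
      simp [pvBuildB, pvTok]
    simp only [show (PySem.List.pyGetD s0 2 "").toList = pvTok s0 from rfl]
    rw [hb0, pvB_build]
    simp [pv_flatten_parts, pvTok]

-- ===== VERDICT (by name: the statement is the Claim_ definition above) =====
theorem make_orginal_text_spans_spec : Claim_equal_make_orginal_text_spans := by
  intro sents _ _
  unfold Spec_make_orginal_text_spans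
  exact main_eq sents
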